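-- pv_equiv track=rewrite | github.com/YukkuriC/my-python-package | YukkuriC/algorithm/edit_distance.py | min_diff_seq
-- ===== SOURCE A (Python) =====
-- def min_diff_map(list1, list2):
--     size1, size2 = len(list1), len(list2)
--     grid = [[(0, 'end')] * (size2 + 1) for _ in range(size1 + 1)]
--
--     # dp
--     for i in range(size1):
--         grid[1 + i][0] = (i + 1, 'del')
--     for i in range(size2):
--         grid[0][1 + i] = (i + 1, 'add')
--     for i, elem1 in enumerate(list1):
--         i += 1
--         for j, elem2 in enumerate(list2):
--             j += 1
--             score, op = min(
--                 (grid[i][j - 1][0] + 1, 'add'),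
--                 (grid[i - 1][j][0] + 1, 'del'),
--             )
--             if elem1 == elem2:
--                 score, op = min(
--                     (score, op),
--                     (grid[i - 1][j - 1][0], 'cpy'),
--                 )
--             grid[i][j] = (score, op)
--
--     return grid
--
-- def min_diff_seq(list1, list2):
--     grid = min_diff_map(list1, list2)
--     ptr1, ptr2 = len(list1), len(list2)
--
--     res = []
--     while ptr1 and ptr2:
--         op = grid[ptr1][ptr2][1]
--         if op == 'add':
--             ptr2 -= 1
--             res.append((op, list2[ptr2]))
--         elif op == 'del':
--             ptr1 -= 1
--             res.append((op, list1[ptr1]))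
--         elif op == 'cpy':
--             ptr1 -= 1
--             ptr2 -= 1
--             res.append((op, list1[ptr1]))
--         else:
--             raise op
--
--     res.reverse()
--     return res
-- ===== SOURCE B (Python) =====
-- def min_diff_seq(list1, list2):
--     # Single forward DP pass keeping only the current and previous row; each cell
--     # carries (score, chain) where chain is a persistent linked list
--     # (op, elem, parent) of the ops on the best path back to the nearest border.
--     # No stored grid and no traceback loop: the answer is read off the final chain.
--     n2 = len(list2)
--     prev = [(j, None) for j in range(n2 + 1)]
--     for i, e1 in enumerate(list1, 1):
--         cur = [(i, None)]
--         for j, e2 in enumerate(list2, 1):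
--             cands = [
--                 (cur[j - 1][0] + 1, 'add', ('add', e2, cur[j - 1][1])),
--                 (prev[j][0] + 1, 'del', ('del', e1, prev[j][1])),
--             ]
--             if e1 == e2:
--                 cands.append((prev[j - 1][0], 'cpy', ('cpy', e1, prev[j - 1][1])))
--             s, _, node = min(cands)
--             cur.append((s, node))
--         prev = cur
--     res = []
--     node = prev[n2][1]
--     while node:
--         res.append((node[0], node[1]))
--         node = node[2]
--     res.reverse()
--     return res
-- ===== Notes on version B (the rewrite author's own statement) =====
-- stated objective: alternative
-- what changed: B replaces A's full (score,op) grid plus backward pointer-traceback loop by a single forward DP pass that keeps only two rows and threads the optimal op path through the DP as persistent backpointer chains (op, elem, parent); the answer is read off the final cell's chain, no traceback over a grid.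
import Mathlib
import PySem

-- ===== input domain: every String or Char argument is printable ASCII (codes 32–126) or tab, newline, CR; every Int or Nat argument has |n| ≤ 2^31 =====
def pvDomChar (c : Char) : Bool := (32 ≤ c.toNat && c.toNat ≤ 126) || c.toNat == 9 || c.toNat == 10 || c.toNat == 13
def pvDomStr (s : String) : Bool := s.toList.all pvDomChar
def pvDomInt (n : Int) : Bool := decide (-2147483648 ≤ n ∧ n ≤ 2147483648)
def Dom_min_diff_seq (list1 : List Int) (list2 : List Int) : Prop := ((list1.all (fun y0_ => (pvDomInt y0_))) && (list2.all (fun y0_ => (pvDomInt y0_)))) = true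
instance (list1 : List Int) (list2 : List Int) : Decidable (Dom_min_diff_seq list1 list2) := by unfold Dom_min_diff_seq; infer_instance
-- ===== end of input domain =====

-- B replaces A's full (score,op) grid plus backward traceback loop by a single forward
-- pass keeping two rows whose cells carry persistent backpointer chains; the answer is
-- read off the final cell's chain. Objective: alternative (same asymptotic cost).

-- ===== PORT A =====
-- Python's min on two (int, str) tuples (lexicographic, first argument on ties)
def pvTMin (p q : Int × String) : Int × String :=
  if p.1 < q.1 then p else if q.1 < p.1 then q else if p.2 ≤ q.2 then p else q

-- one dp cell of A: min((left+1,'add'),(up+1,'del')) and, on equal elements, min with (diag,'cpy')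
def aStep (e1 e2 left up diag : Int) : Int × String :=
  let base := pvTMin (left + 1, "add") (up + 1, "del")
  if e1 = e2 then pvTMin base (diag, "cpy") else base

-- inner `for j, elem2 in enumerate(list2)` loop: the running cell grid[i][j-1] is the carried `left`
def aRowGo (e1 : Int) (prev : List (Int × String)) : Nat → (Int × String) → List Int → List (Int × String)
  | _, _, [] => []
  | j, left, e2 :: rest =>
    let c := aStep e1 e2 left.1 (prev.getD (j+1) (0,"end")).1 (prev.getD j (0,"end")).1
    c :: aRowGo e1 prev (j+1) c rest

-- row i of the grid: border cell (i+1,'del') then the dp loop over list2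
def aRow (e1 : Int) (i : Nat) (prev : List (Int × String)) (l2 : List Int) : List (Int × String) :=
  ((i:Int) + 1, "del") :: aRowGo e1 prev 0 ((i:Int) + 1, "del") l2

-- outer `for i, elem1 in enumerate(list1)` loop, carrying the previous row
def aRowsAux (l2 : List Int) : List Int → Nat → List (Int × String) → List (List (Int × String))
  | [], _, prev => [prev]
  | e1 :: rest, i, prev => prev :: aRowsAux l2 rest (i+1) (aRow e1 i prev l2)

-- row 0: (0,'end') then the 'add' border
def aRow0 (l2 : List Int) : List (Int × String) :=
  ((0:Int), "end") :: (List.range l2.length).map (fun k => (Int.ofNat k + 1, "add"))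

def aGrid (l1 l2 : List Int) : List (List (Int × String)) := aRowsAux l2 l1 0 (aRow0 l2)

def get2A (g : List (List (Int × String))) (i j : Nat) : Int × String :=
  (g.getD i []).getD j (0,"end")

-- `while ptr1 and ptr2` traceback; fuel = ptr1+ptr2 bounds the iteration count
def aTrace (g : List (List (Int × String))) (l1 l2 : List Int) :
    Nat → Nat → Nat → List (String × Int) → List (String × Int)
  | 0, _, _, res => res
  | fuel+1, p1, p2, res =>
    if p1 = 0 ∨ p2 = 0 then res
    else
      let op := (get2A g p1 p2).2
      if op = "add" then aTrace g l1 l2 fuel p1 (p2-1) (res ++ [(op, l2.getD (p2-1) 0)])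
      else if op = "del" then aTrace g l1 l2 fuel (p1-1) p2 (res ++ [(op, l1.getD (p1-1) 0)])
      else if op = "cpy" then aTrace g l1 l2 fuel (p1-1) (p2-1) (res ++ [(op, l1.getD (p1-1) 0)])
      else res  -- Python `raise op` (unreachable on grids built by aGrid)

def min_diff_seq (list1 : List Int) (list2 : List Int) : List (String × Int) :=
  (aTrace (aGrid list1 list2) list1 list2 (list1.length + list2.length)
    list1.length list2.length []).reverse

-- ===== PORT B =====
-- Python's node tuple ('op', elem, parent) / None: a persistent backpointer chain
inductive Chain
  | nil
  | node : String → Int → Chain → Chain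
deriving DecidableEq, Repr

-- Python's min over the candidate triples (score, op, node): first minimal under
-- lexicographic order (the op strings are distinct, so the node is never compared)
def cMin (a b : Int × String × Chain) : Int × String × Chain :=
  if b.1 < a.1 then b else if a.1 < b.1 then a else if b.2.1 < a.2.1 then b else a

-- one dp cell of B: build the candidate triples, take the min, keep (score, node)
def bCell (e1 e2 : Int) (left up diag : Int × Chain) : Int × Chain :=
  let cA : Int × String × Chain := (left.1 + 1, "add", Chain.node "add" e2 left.2)
  let cD : Int × String × Chain := (up.1 + 1, "del", Chain.node "del" e1 up.2)
  let m := if e1 = e2 then cMin (cMin cA cD) (diag.1, "cpy", Chain.node "cpy" e1 diag.2)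
           else cMin cA cD
  (m.1, m.2.2)

-- inner `for j, e2 in enumerate(list2, 1)` loop: cur[j-1] is the carried `left`
def bRowGo (e1 : Int) (prev : List (Int × Chain)) : Nat → (Int × Chain) → List Int → List (Int × Chain)
  | _, _, [] => []
  | j, left, e2 :: rest =>
    let c := bCell e1 e2 left (prev.getD (j+1) (0, Chain.nil)) (prev.getD j (0, Chain.nil))
    c :: bRowGo e1 prev (j+1) c rest

-- one row: border cell (i, None) then the dp loop over list2
def bRow (e1 : Int) (i : Nat) (prev : List (Int × Chain)) (l2 : List Int) : List (Int × Chain) :=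
  ((i:Int) + 1, Chain.nil) :: bRowGo e1 prev 0 ((i:Int) + 1, Chain.nil) l2

-- outer `for i, e1 in enumerate(list1, 1)` loop: only the previous row is carried
def bRows (l2 : List Int) : List Int → Nat → List (Int × Chain) → List (Int × Chain)
  | [], _, prev => prev
  | e1 :: rest, i, prev => bRows l2 rest (i+1) (bRow e1 i prev l2)

-- `while node:` unwinding loop (appends, then the caller reverses)
def bWalk : Chain → List (String × Int) → List (String × Int)
  | Chain.nil, res => res
  | Chain.node op e p, res => bWalk p (res ++ [(op, e)])

def min_diff_seq_alt (list1 : List Int) (list2 : List Int) : List (String × Int) :=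
  let final := bRows list2 list1 0
    ((List.range (list2.length + 1)).map (fun j : Nat => ((j:Int), Chain.nil)))
  (bWalk (final.getD list2.length ((0:Int), Chain.nil)).2 []).reverse

-- ===== PRECONDITION & SPEC =====
def Spec_min_diff_seq (list1 : List Int) (list2 : List Int) (out : List (String × Int)) : Prop := out = min_diff_seq_alt list1 list2
instance (list1 : List Int) (list2 : List Int) (out : List (String × Int)) : Decidable (Spec_min_diff_seq list1 list2 out) := by unfold Spec_min_diff_seq; infer_instance

-- ===== CLAIM (what is proved, stated in full; the proofs are below) =====
def Claim_equal_min_diff_seq : Prop := ∀ (list1 : List Int) (list2 : List Int), Dom_min_diff_seq list1 list2 → Spec_min_diff_seq list1 list2 (min_diff_seq list1 list2)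

-- ===== LEMMAS AND PROOFS =====

theorem pvTMin_snd_mem (p q : Int × String) : (pvTMin p q).2 = p.2 ∨ (pvTMin p q).2 = q.2 := by
  unfold pvTMin; split_ifs <;> simp

theorem aStep_snd_mem (e1 e2 l u d : Int) :
    (aStep e1 e2 l u d).2 = "add" ∨ (aStep e1 e2 l u d).2 = "del" ∨ (aStep e1 e2 l u d).2 = "cpy" := by
  unfold aStep
  split_ifs with h
  · rcases pvTMin_snd_mem (pvTMin (l + 1, "add") (u + 1, "del")) (d, "cpy") with h1 | h1
    · rw [h1]; rcases pvTMin_snd_mem (l + 1, "add") (u + 1, "del") with h2 | h2 <;> simp [h2]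
    · simp [h1]
  · rcases pvTMin_snd_mem (l + 1, "add") (u + 1, "del") with h2 | h2 <;> simp [h2]

-- the result chain grows over the walk: bWalk is appending `unwind`
def unwind : Chain → List (String × Int)
  | Chain.nil => []
  | Chain.node op e p => (op, e) :: unwind p

theorem bWalk_unwind (c : Chain) : ∀ res, bWalk c res = res ++ unwind c := by
  induction c with
  | nil => intro res; simp [bWalk, unwind]
  | node op e p ih => intro res; simp [bWalk, unwind, ih]

-- the B cell equals A's cell score together with the backpointer selected by A's op
-- explicit forms of the candidate minima (the op strings are fixed literals)
theorem pvTMin_ad (l u : Int) : pvTMin (l+1,"add") (u+1,"del") = if l ≤ u then (l+1,"add") else (u+1,"del") := by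
  have hs : (("add":String) ≤ "del") := by rw [String.le_iff_toList_le]; decide
  unfold pvTMin; split_ifs <;> first | rfl | omega | exact absurd hs ‹_›

theorem pvTMin_ac (s d : Int) : pvTMin (s,"add") (d,"cpy") = if s ≤ d then (s,"add") else (d,"cpy") := by
  have hs : (("add":String) ≤ "cpy") := by rw [String.le_iff_toList_le]; decide
  unfold pvTMin; split_ifs <;> first | rfl | omega | exact absurd hs ‹_›

theorem pvTMin_dc (s d : Int) : pvTMin (s,"del") (d,"cpy") = if s < d then (s,"del") else (d,"cpy") := by
  have hs : ¬ (("del":String) ≤ "cpy") := by rw [String.le_iff_toList_le]; decide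
  unfold pvTMin; split_ifs <;> first | rfl | omega | exact absurd ‹_› hs

theorem cMin_ad (l u : Int) (x y : Chain) :
    cMin (l+1,"add",x) (u+1,"del",y) = if l ≤ u then (l+1,"add",x) else (u+1,"del",y) := by
  have hs : ¬ (("del":String) < "add") := by rw [String.lt_iff_toList_lt]; decide
  unfold cMin; split_ifs <;> first | rfl | omega | exact absurd ‹_› hs

theorem cMin_ac (s d : Int) (x z : Chain) :
    cMin (s,"add",x) (d,"cpy",z) = if s ≤ d then (s,"add",x) else (d,"cpy",z) := by
  have hs : ¬ (("cpy":String) < "add") := by rw [String.lt_iff_toList_lt]; decide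
  unfold cMin; split_ifs <;> first | rfl | omega | exact absurd ‹_› hs

theorem cMin_dc (s d : Int) (y z : Chain) :
    cMin (s,"del",y) (d,"cpy",z) = if s < d then (s,"del",y) else (d,"cpy",z) := by
  have hs : (("cpy":String) < "del") := by rw [String.lt_iff_toList_lt]; decide
  unfold cMin; split_ifs <;> first | rfl | omega | exact absurd hs ‹_›

-- the B cell equals A's cell score together with the backpointer selected by A's op
theorem bCell_spec (e1 e2 : Int) (l u d : Int × Chain) :
    bCell e1 e2 l u d =
      ((aStep e1 e2 l.1 u.1 d.1).1,
       if (aStep e1 e2 l.1 u.1 d.1).2 = "add" then Chain.node "add" e2 l.2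
       else if (aStep e1 e2 l.1 u.1 d.1).2 = "del" then Chain.node "del" e1 u.2
       else Chain.node "cpy" e1 d.2) := by
  simp only [bCell, aStep]
  rw [cMin_ad]; simp only [pvTMin_ad]
  by_cases he : e1 = e2 <;> simp only [he, if_true, if_false] <;>
    by_cases hlu : l.1 ≤ u.1 <;> simp only [hlu, if_true, if_false]
  · rw [cMin_ac]; simp only [pvTMin_ac]
    by_cases hd : l.1 + 1 ≤ d.1 <;> simp [hd]
  · rw [cMin_dc]; simp only [pvTMin_dc]
    by_cases hd : u.1 + 1 < d.1 <;> simp [hd]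
  all_goals simp

-- ==== indexed characterisations of the two grids ====

theorem getD_range_map {α : Type} (f : Nat → α) (n k : Nat) (d : α) (h : k < n) :
    ((List.range n).map f).getD k d = f k := by
  have hl : k < ((List.range n).map f).length := by simp [h]
  rw [List.getD_eq_getElem _ _ hl]; simp

theorem rowsAux_zero (l2 rest : List Int) (i : Nat) (prev : List (Int × String)) :
    (aRowsAux l2 rest i prev).getD 0 [] = prev := by
  cases rest <;> rfl

theorem rowsAux_succ (l2 : List Int) :
    ∀ (rest : List Int) (i : Nat) (prev : List (Int × String)) (k : Nat), k < rest.length →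
    (aRowsAux l2 rest i prev).getD (k+1) [] =
      aRow (rest.getD k 0) (i+k) ((aRowsAux l2 rest i prev).getD k []) l2 := by
  intro rest
  induction rest with
  | nil => intro i prev k h; simp at h
  | cons e1 r ih =>
    intro i prev k h
    cases k with
    | zero =>
      simp only [aRowsAux, List.getD_cons_succ, List.getD_cons_zero, Nat.add_zero, rowsAux_zero]
    | succ k' =>
      have h' : k' < r.length := by
        simp only [List.length_cons] at h; omega
      simp only [aRowsAux, List.getD_cons_succ]
      rw [ih (i+1) _ k' h']
      have harith : i + 1 + k' = i + (k' + 1) := by omega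
      rw [harith]

theorem rowA_zero (l1 l2 : List Int) : (aGrid l1 l2).getD 0 [] = aRow0 l2 := by
  unfold aGrid; exact rowsAux_zero l2 l1 0 (aRow0 l2)

theorem rowA_succ (l1 l2 : List Int) (k : Nat) (hk : k < l1.length) :
    (aGrid l1 l2).getD (k+1) [] = aRow (l1.getD k 0) k ((aGrid l1 l2).getD k []) l2 := by
  have := rowsAux_succ l2 l1 0 (aRow0 l2) k hk
  simpa [aGrid] using this

theorem go_spec (e1 : Int) (prev : List (Int × String)) :
    ∀ (l2' : List Int) (j0 : Nat) (left : Int × String) (k : Nat), k < l2'.length →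
    (left :: aRowGo e1 prev j0 left l2').getD (k+1) ((0:Int),"end")
      = aStep e1 (l2'.getD k 0)
          ((left :: aRowGo e1 prev j0 left l2').getD k ((0:Int),"end")).1
          (prev.getD (j0+k+1) ((0:Int),"end")).1
          (prev.getD (j0+k) ((0:Int),"end")).1 := by
  intro l2'
  induction l2' with
  | nil => intro j0 left k h; simp at h
  | cons e2 rest ih =>
    intro j0 left k h
    cases k with
    | zero => simp [aRowGo]
    | succ k' =>
      have h' : k' < rest.length := by
        simp only [List.length_cons] at h; omega
      have e2' : j0 + (k' + 1) = (j0 + 1) + k' := by omega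
      have hh := ih (j0+1) (aStep e1 e2 left.1 (prev.getD (j0+1) (0,"end")).1 (prev.getD j0 (0,"end")).1) k' h'
      simp only [List.getD_cons_succ] at hh
      simp only [aRowGo, List.getD_cons_succ, e2']
      exact hh

theorem aRow_rec (e1 : Int) (i : Nat) (prev : List (Int × String)) (l2 : List Int)
    (j : Nat) (h1 : 1 ≤ j) (h2 : j ≤ l2.length) :
    (aRow e1 i prev l2).getD j ((0:Int),"end")
      = aStep e1 (l2.getD (j-1) 0)
          ((aRow e1 i prev l2).getD (j-1) ((0:Int),"end")).1
          (prev.getD j ((0:Int),"end")).1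
          (prev.getD (j-1) ((0:Int),"end")).1 := by
  obtain ⟨k, rfl⟩ : ∃ k, j = k + 1 := ⟨j - 1, by omega⟩
  have hk : k < l2.length := by omega
  have := go_spec e1 prev l2 0 ((i:Int)+1, "del") k hk
  simp only [Nat.zero_add] at this
  simpa [aRow] using this

theorem gridA_rec (l1 l2 : List Int) (i j : Nat)
    (hi1 : 1 ≤ i) (hi2 : i ≤ l1.length) (hj1 : 1 ≤ j) (hj2 : j ≤ l2.length) :
    get2A (aGrid l1 l2) i j
      = aStep (l1.getD (i-1) 0) (l2.getD (j-1) 0)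
          (get2A (aGrid l1 l2) i (j-1)).1
          (get2A (aGrid l1 l2) (i-1) j).1
          (get2A (aGrid l1 l2) (i-1) (j-1)).1 := by
  obtain ⟨k, rfl⟩ : ∃ k, i = k + 1 := ⟨i - 1, by omega⟩
  have hk : k < l1.length := by omega
  unfold get2A
  rw [rowA_succ l1 l2 k hk, aRow_rec _ _ _ _ j hj1 hj2]
  simp

-- B's successive rows, indexed (proof-side mirror of the carried `prev`)
def rowB (l1 l2 : List Int) : Nat → List (Int × Chain)
  | 0 => (List.range (l2.length + 1)).map (fun j : Nat => ((j:Int), Chain.nil))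
  | k+1 => bRow (l1.getD k 0) k (rowB l1 l2 k) l2

theorem bRows_drop (l1 l2 : List Int) :
    ∀ (n k : Nat), l1.length - k = n → k ≤ l1.length →
    bRows l2 (l1.drop k) k (rowB l1 l2 k) = rowB l1 l2 l1.length := by
  intro n
  induction n with
  | zero =>
    intro k h hk
    have : k = l1.length := by omega
    subst this
    simp [bRows]
  | succ m ih =>
    intro k h hk
    have hlt : k < l1.length := by omega
    rw [List.drop_eq_getElem_cons hlt]
    have hx : l1[k] = l1.getD k 0 := by rw [List.getD_eq_getElem _ _ hlt]
    show bRows l2 (l1[k] :: l1.drop (k+1)) k (rowB l1 l2 k) = _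
    rw [show bRows l2 (l1[k] :: l1.drop (k+1)) k (rowB l1 l2 k)
          = bRows l2 (l1.drop (k+1)) (k+1) (bRow l1[k] k (rowB l1 l2 k) l2) from rfl,
        hx]
    exact ih (k+1) (by omega) (by omega)

theorem goB_spec (e1 : Int) (prev : List (Int × Chain)) :
    ∀ (l2' : List Int) (j0 : Nat) (left : Int × Chain) (k : Nat), k < l2'.length →
    (left :: bRowGo e1 prev j0 left l2').getD (k+1) ((0:Int), Chain.nil)
      = bCell e1 (l2'.getD k 0)
          ((left :: bRowGo e1 prev j0 left l2').getD k ((0:Int), Chain.nil))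
          (prev.getD (j0+k+1) ((0:Int), Chain.nil))
          (prev.getD (j0+k) ((0:Int), Chain.nil)) := by
  intro l2'
  induction l2' with
  | nil => intro j0 left k h; simp at h
  | cons e2 rest ih =>
    intro j0 left k h
    cases k with
    | zero => simp [bRowGo]
    | succ k' =>
      have h' : k' < rest.length := by
        simp only [List.length_cons] at h; omega
      have e2' : j0 + (k' + 1) = (j0 + 1) + k' := by omega
      have hh := ih (j0+1) (bCell e1 e2 left (prev.getD (j0+1) (0, Chain.nil)) (prev.getD j0 (0, Chain.nil))) k' h'
      simp only [List.getD_cons_succ] at hh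
      simp only [bRowGo, List.getD_cons_succ, e2']
      exact hh

theorem bRow_rec (e1 : Int) (i : Nat) (prev : List (Int × Chain)) (l2 : List Int)
    (j : Nat) (h1 : 1 ≤ j) (h2 : j ≤ l2.length) :
    (bRow e1 i prev l2).getD j ((0:Int), Chain.nil)
      = bCell e1 (l2.getD (j-1) 0)
          ((bRow e1 i prev l2).getD (j-1) ((0:Int), Chain.nil))
          (prev.getD j ((0:Int), Chain.nil))
          (prev.getD (j-1) ((0:Int), Chain.nil)) := by
  obtain ⟨k, rfl⟩ : ∃ k, j = k + 1 := ⟨j - 1, by omega⟩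
  have hk : k < l2.length := by omega
  have := goB_spec e1 prev l2 0 ((i:Int)+1, Chain.nil) k hk
  simp only [Nat.zero_add] at this
  simpa [bRow] using this

-- border cells of B's rows carry the empty chain and the border score
theorem rowB_zero_getD (l1 l2 : List Int) (j : Nat) (hj : j ≤ l2.length) :
    (rowB l1 l2 0).getD j ((0:Int), Chain.nil) = ((j:Int), Chain.nil) := by
  show ((List.range (l2.length + 1)).map (fun j : Nat => ((j:Int), Chain.nil))).getD j _ = _
  exact getD_range_map (fun j : Nat => ((j:Int), Chain.nil)) (l2.length + 1) j _ (by omega)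

theorem rowB_head (l1 l2 : List Int) (i : Nat) :
    (rowB l1 l2 i).getD 0 ((0:Int), Chain.nil) = ((i:Int), Chain.nil) := by
  cases i with
  | zero => exact rowB_zero_getD l1 l2 0 (by omega)
  | succ k =>
    simp only [rowB, bRow, List.getD_cons_zero]
    push_cast
    rfl

-- A's border scores
theorem gridA_col0 (l1 l2 : List Int) (i : Nat) (hi : i ≤ l1.length) :
    (get2A (aGrid l1 l2) i 0).1 = (i:Int) := by
  cases i with
  | zero => rw [get2A, rowA_zero]; simp [aRow0]
  | succ k =>
    rw [get2A, rowA_succ l1 l2 k (by omega)]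
    simp only [aRow, List.getD_cons_zero]
    push_cast
    ring

theorem gridA_row0 (l1 l2 : List Int) (j : Nat) (hj : j ≤ l2.length) :
    (get2A (aGrid l1 l2) 0 j).1 = (j:Int) := by
  rw [get2A, rowA_zero]
  cases j with
  | zero => simp [aRow0]
  | succ m =>
    unfold aRow0
    rw [List.getD_cons_succ,
        getD_range_map (fun k => (Int.ofNat k + 1, "add")) l2.length m _ (by omega)]
    rw [Int.ofNat_eq_natCast]
    push_cast
    ring

theorem scoreEq (l1 l2 : List Int) :
    ∀ (i : Nat), i ≤ l1.length → ∀ (j : Nat), j ≤ l2.length →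
    ((rowB l1 l2 i).getD j ((0:Int), Chain.nil)).1 = (get2A (aGrid l1 l2) i j).1 := by
  intro i
  induction i with
  | zero =>
    intro _ j hj
    rw [rowB_zero_getD l1 l2 j hj, gridA_row0 l1 l2 j hj]
  | succ k ih =>
    intro hk j
    induction j with
    | zero =>
      intro _
      rw [rowB_head, gridA_col0 l1 l2 (k+1) hk]
    | succ m ihm =>
      intro hj
      have hm : m ≤ l2.length := by omega
      have hk' : k ≤ l1.length := by omega
      have hrowB : rowB l1 l2 (k+1) = bRow (l1.getD k 0) k (rowB l1 l2 k) l2 := rfl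
      have hrec := bRow_rec (l1.getD k 0) k (rowB l1 l2 k) l2 (m+1) (by omega) hj
      rw [← hrowB] at hrec
      rw [hrec, bCell_spec, gridA_rec l1 l2 (k+1) (m+1) (by omega) hk (by omega) hj]
      simp only [Nat.add_sub_cancel]
      rw [ihm hm, ih hk' (m+1) hj, ih hk' m hm]

-- unfolding one step of aTrace
theorem aTrace_step (g : List (List (Int × String))) (l1 l2 : List Int) (f i j : Nat)
    (res : List (String × Int)) :
    aTrace g l1 l2 (f+1) i j res =
      if i = 0 ∨ j = 0 then res
      else
        let op := (get2A g i j).2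
        if op = "add" then aTrace g l1 l2 f i (j-1) (res ++ [(op, l2.getD (j-1) 0)])
        else if op = "del" then aTrace g l1 l2 f (i-1) j (res ++ [(op, l1.getD (i-1) 0)])
        else if op = "cpy" then aTrace g l1 l2 f (i-1) (j-1) (res ++ [(op, l1.getD (i-1) 0)])
        else res := rfl

-- aTrace only appends to its accumulator
theorem aTrace_append (g : List (List (Int × String))) (l1 l2 : List Int) :
    ∀ (fuel i j : Nat) (res : List (String × Int)),
    aTrace g l1 l2 fuel i j res = res ++ aTrace g l1 l2 fuel i j [] := by
  intro fuel
  induction fuel with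
  | zero => intro i j res; simp [aTrace]
  | succ f ih =>
    intro i j res
    by_cases hb : i = 0 ∨ j = 0
    · rw [aTrace_step, aTrace_step, if_pos hb, if_pos hb]; simp
    · rw [aTrace_step, aTrace_step, if_neg hb, if_neg hb]
      simp only []
      split_ifs
      · rw [ih i (j-1) (res ++ _), ih i (j-1) ([] ++ _)]; simp
      · rw [ih (i-1) j (res ++ _), ih (i-1) j ([] ++ _)]; simp
      · rw [ih (i-1) (j-1) (res ++ _), ih (i-1) (j-1) ([] ++ _)]; simp
      · simp

theorem aTrace_step_add (g : List (List (Int × String))) (l1 l2 : List Int) (f i j : Nat)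
    (res : List (String × Int)) (hc : ¬(i = 0 ∨ j = 0)) (hop : (get2A g i j).2 = "add") :
    aTrace g l1 l2 (f+1) i j res = aTrace g l1 l2 f i (j-1) (res ++ [("add", l2.getD (j-1) 0)]) := by
  rw [aTrace_step, if_neg hc]
  simp [hop]

theorem aTrace_step_del (g : List (List (Int × String))) (l1 l2 : List Int) (f i j : Nat)
    (res : List (String × Int)) (hc : ¬(i = 0 ∨ j = 0)) (hop : (get2A g i j).2 = "del") :
    aTrace g l1 l2 (f+1) i j res = aTrace g l1 l2 f (i-1) j (res ++ [("del", l1.getD (i-1) 0)]) := by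
  rw [aTrace_step, if_neg hc]
  simp [hop]

theorem aTrace_step_cpy (g : List (List (Int × String))) (l1 l2 : List Int) (f i j : Nat)
    (res : List (String × Int)) (hc : ¬(i = 0 ∨ j = 0)) (hop : (get2A g i j).2 = "cpy") :
    aTrace g l1 l2 (f+1) i j res = aTrace g l1 l2 f (i-1) (j-1) (res ++ [("cpy", l1.getD (i-1) 0)]) := by
  rw [aTrace_step, if_neg hc]
  simp [hop]

-- the chain at (i,j) spells out A's traceback from (i,j)
theorem chainTrace (l1 l2 : List Int) :
    ∀ (fuel i j : Nat), i ≤ l1.length → j ≤ l2.length → i + j ≤ fuel →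
    unwind ((rowB l1 l2 i).getD j ((0:Int), Chain.nil)).2
      = aTrace (aGrid l1 l2) l1 l2 fuel i j [] := by
  intro fuel
  induction fuel with
  | zero =>
    intro i j hi hj hf
    have : i = 0 ∧ j = 0 := by omega
    obtain ⟨rfl, rfl⟩ := this
    rw [rowB_head]
    rfl
  | succ f ih =>
    intro i j hi hj hf
    by_cases hb : i = 0 ∨ j = 0
    · have hnil : ((rowB l1 l2 i).getD j ((0:Int), Chain.nil)).2 = Chain.nil := by
        rcases hb with rfl | rfl
        · rw [rowB_zero_getD l1 l2 j hj]
        · rw [rowB_head]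
      rw [hnil, aTrace_step, if_pos hb]
      rfl
    · simp only [not_or] at hb
      obtain ⟨hi0, hj0⟩ := hb
      obtain ⟨k, rfl⟩ : ∃ k, i = k + 1 := ⟨i - 1, by omega⟩
      obtain ⟨m, rfl⟩ : ∃ m, j = m + 1 := ⟨j - 1, by omega⟩
      have hm : m ≤ l2.length := by omega
      have hk : k ≤ l1.length := by omega
      have hrowB : rowB l1 l2 (k+1) = bRow (l1.getD k 0) k (rowB l1 l2 k) l2 := rfl
      have hcell := bRow_rec (l1.getD k 0) k (rowB l1 l2 k) l2 (m+1) (by omega) hj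
      rw [← hrowB] at hcell
      rw [bCell_spec] at hcell
      simp only [Nat.add_sub_cancel] at hcell
      have hstep : aStep (l1.getD k 0) (l2.getD m 0)
            ((rowB l1 l2 (k+1)).getD m ((0:Int), Chain.nil)).1
            ((rowB l1 l2 k).getD (m+1) ((0:Int), Chain.nil)).1
            ((rowB l1 l2 k).getD m ((0:Int), Chain.nil)).1
          = get2A (aGrid l1 l2) (k+1) (m+1) := by
        rw [scoreEq l1 l2 (k+1) hi m hm, scoreEq l1 l2 k hk (m+1) hj, scoreEq l1 l2 k hk m hm]
        rw [gridA_rec l1 l2 (k+1) (m+1) (by omega) hi (by omega) hj]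
        simp
      rw [hstep] at hcell
      have hop := aStep_snd_mem (l1.getD k 0) (l2.getD m 0)
          ((rowB l1 l2 (k+1)).getD m ((0:Int), Chain.nil)).1
          ((rowB l1 l2 k).getD (m+1) ((0:Int), Chain.nil)).1
          ((rowB l1 l2 k).getD m ((0:Int), Chain.nil)).1
      rw [hstep] at hop
      have hcond : ¬(k+1 = 0 ∨ m+1 = 0) := by omega
      rcases hop with hm' | hm' | hm'
      · have hc2 : ((rowB l1 l2 (k+1)).getD (m+1) ((0:Int), Chain.nil)).2
            = Chain.node "add" (l2.getD m 0) ((rowB l1 l2 (k+1)).getD m ((0:Int), Chain.nil)).2 := by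
          rw [hcell]; simp [hm']
        rw [hc2]
        simp only [unwind]
        rw [ih (k+1) m hi hm (by omega),
            aTrace_step_add (aGrid l1 l2) l1 l2 f (k+1) (m+1) [] hcond hm']
        simp only [Nat.add_sub_cancel, List.nil_append]
        rw [aTrace_append _ _ _ f (k+1) m [("add", l2.getD m 0)]]
        rfl
      · have hc2 : ((rowB l1 l2 (k+1)).getD (m+1) ((0:Int), Chain.nil)).2
            = Chain.node "del" (l1.getD k 0) ((rowB l1 l2 k).getD (m+1) ((0:Int), Chain.nil)).2 := by
          rw [hcell]; simp [hm']
        rw [hc2]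
        simp only [unwind]
        rw [ih k (m+1) hk hj (by omega),
            aTrace_step_del (aGrid l1 l2) l1 l2 f (k+1) (m+1) [] hcond hm']
        simp only [Nat.add_sub_cancel, List.nil_append]
        rw [aTrace_append _ _ _ f k (m+1) [("del", l1.getD k 0)]]
        rfl
      · have hc2 : ((rowB l1 l2 (k+1)).getD (m+1) ((0:Int), Chain.nil)).2
            = Chain.node "cpy" (l1.getD k 0) ((rowB l1 l2 k).getD m ((0:Int), Chain.nil)).2 := by
          rw [hcell]; simp [hm']
        rw [hc2]
        simp only [unwind]
        rw [ih k m hk hm (by omega),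
            aTrace_step_cpy (aGrid l1 l2) l1 l2 f (k+1) (m+1) [] hcond hm']
        simp only [Nat.add_sub_cancel, List.nil_append]
        rw [aTrace_append _ _ _ f k m [("cpy", l1.getD k 0)]]
        rfl

-- ===== VERDICT (by name: the statement is the Claim_ definition above) =====
theorem min_diff_seq_spec : Claim_equal_min_diff_seq := by
  intro l1 l2 _
  unfold Spec_min_diff_seq min_diff_seq
  simp only [min_diff_seq_alt]
  have hfinal : bRows l2 l1 0
      ((List.range (l2.length + 1)).map (fun j : Nat => ((j:Int), Chain.nil)))
      = rowB l1 l2 l1.length := by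
    have := bRows_drop l1 l2 l1.length 0 (by omega) (by omega)
    simpa [rowB] using this
  rw [hfinal, bWalk_unwind, List.nil_append,
      chainTrace l1 l2 (l1.length + l2.length) l1.length l2.length (le_refl _) (le_refl _) (le_refl _)]
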